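-- pv_equiv track=rewrite | github.com/Cc-bugwriter/NLP-SS2020 | Uebung_08/util/utils.py | get_task_data
-- ===== SOURCE A (Python) =====
-- task_to_column = {"pos": 1, "chunk": 2, "ner": 3}
--
-- def get_task_data(task, dataset):
--     ''' Given a task, filters out all other task labels from the given dataset
--     '''
--     xs = []
--     ys = []
--     for sentence in dataset:
--         x = [tup[0] for tup in sentence]
--         xs.append(x)
--
--         y = [tup[task_to_column[task]] for tup in sentence]
--         ys.append(y)
--     return xs, ys
-- ===== SOURCE B (Python) =====
-- task_to_column = {"pos": 1, "chunk": 2, "ner": 3}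
--
-- def get_task_data(task, dataset):
--     ''' Given a task, filters out all other task labels from the given dataset
--     '''
--     col = task_to_column[task]
--     # column-major mirror of the whole dataset: one list of sentences per column
--     cols = [[], [], [], []]
--     for sentence in dataset:
--         cur = ([], [], [], [])
--         for w, pos, chunk, ner in sentence:
--             cur[0].append(w)
--             cur[1].append(pos)
--             cur[2].append(chunk)
--             cur[3].append(ner)
--         for whole, part in zip(cols, cur):
--             whole.append(part)
--     return cols[0], cols[col]
-- ===== Notes on version B (the rewrite author's own statement) =====
-- stated objective: alternative
-- what changed: B builds the full column-major transpose of the dataset (all four columns at once) in a single token-level loop with four accumulators, then selects column 0 and the task column looked up once up front; A instead runs two per-sentence comprehensions with a per-token dict lookup and never materialises the other columns.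
-- outside the precondition, e.g. on get_task_data('bad', [[]]): A returns ([[]], [[]]), B raises KeyError
import Mathlib
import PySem

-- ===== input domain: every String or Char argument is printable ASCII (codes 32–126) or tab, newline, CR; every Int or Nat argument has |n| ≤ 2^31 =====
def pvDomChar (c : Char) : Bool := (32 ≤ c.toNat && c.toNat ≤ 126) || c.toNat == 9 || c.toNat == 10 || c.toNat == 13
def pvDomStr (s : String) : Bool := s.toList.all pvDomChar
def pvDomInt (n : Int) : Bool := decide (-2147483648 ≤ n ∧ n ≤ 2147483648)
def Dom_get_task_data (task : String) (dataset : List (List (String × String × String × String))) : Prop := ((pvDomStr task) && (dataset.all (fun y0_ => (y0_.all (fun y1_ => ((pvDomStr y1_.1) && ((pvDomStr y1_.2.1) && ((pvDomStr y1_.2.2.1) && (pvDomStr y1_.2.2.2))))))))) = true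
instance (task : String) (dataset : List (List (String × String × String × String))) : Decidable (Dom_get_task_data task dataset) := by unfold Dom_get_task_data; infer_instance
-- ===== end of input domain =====

-- B builds the full column-major transpose of the dataset in one token-level pass with
-- four accumulators and then selects column 0 and the task column — alternative, same cost.

-- ===== PORT A =====
-- the module-level dict task_to_column
def taskToColumn : PySem.Dict String Int :=
  PySem.Dict.ofList [("pos", 1), ("chunk", 2), ("ner", 3)]

-- tuple indexing tup[i] for the 4-tuples of this dataset (exact for i ∈ {1,2,3},
-- the only values reachable under Pre_)
def tupGet (t : String × String × String × String) (i : Int) : String :=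
  if i = 0 then t.1 else if i = 1 then t.2.1 else if i = 2 then t.2.2.1 else t.2.2.2

def get_task_data (task : String) (dataset : List (List (String × String × String × String))) : List (List String) × List (List String) :=
  dataset.foldl
    (fun acc sentence =>
      (acc.1 ++ [sentence.map (fun tup => tup.1)],
       acc.2 ++ [sentence.map (fun tup => tupGet tup (PySem.Dict.getD taskToColumn task 0))]))
    ([], [])

-- ===== PORT B =====
-- abbreviation for the four column accumulators (cols / cur in Source B)
def Cols4 : Type := List (List String) × List (List String) × List (List String) × List (List String)
def Cur4 : Type := List String × List String × List String × List String

-- cols[col] selection at the end of Source B (col ∈ {1,2,3} under Pre_; 0 picks the word column)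
def colsGet (cs : Cols4) (i : Int) : List (List String) :=
  if i = 0 then cs.1 else if i = 1 then cs.2.1 else if i = 2 then cs.2.2.1 else cs.2.2.2

def get_task_data_alt (task : String) (dataset : List (List (String × String × String × String))) : List (List String) × List (List String) :=
  let col := PySem.Dict.getD taskToColumn task 0
  let cols : Cols4 := dataset.foldl
    (fun (cs : Cols4) sentence =>
      let cur : Cur4 := sentence.foldl
        (fun (c : Cur4) t =>
          (c.1 ++ [t.1], c.2.1 ++ [t.2.1], c.2.2.1 ++ [t.2.2.1], c.2.2.2 ++ [t.2.2.2]))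
        ([], [], [], [])
      (cs.1 ++ [cur.1], cs.2.1 ++ [cur.2.1], cs.2.2.1 ++ [cur.2.2.1], cs.2.2.2 ++ [cur.2.2.2]))
    ([], [], [], [])
  (cols.1, colsGet cols col)

-- ===== PRECONDITION & SPEC =====
-- Pre_ excludes invalid task names: there A raises KeyError on any nonempty sentence, and its
-- returning empty columns when every sentence is empty is an accident of lazy per-token lookup;
-- B looks the column up once and raises KeyError for any invalid task.
def Pre_get_task_data (task : String) (dataset : List (List (String × String × String × String))) : Prop :=
  task = "pos" ∨ task = "chunk" ∨ task = "ner"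
instance (task : String) (dataset : List (List (String × String × String × String))) : Decidable (Pre_get_task_data task dataset) := by unfold Pre_get_task_data; infer_instance
def pvWitness_get_task_data : String × (List (List (String × String × String × String))) :=
  ("pos", [[("a", "b", "c", "d")], []])

def Spec_get_task_data (task : String) (dataset : List (List (String × String × String × String))) (out : List (List String) × List (List String)) : Prop := out = get_task_data_alt task dataset
instance (task : String) (dataset : List (List (String × String × String × String))) (out : List (List String) × List (List String)) : Decidable (Spec_get_task_data task dataset out) := by unfold Spec_get_task_data; infer_instance

-- ===== CLAIM (what is proved, stated in full; the proofs are below) =====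
def Claim_equal_get_task_data : Prop := ∀ (task : String) (dataset : List (List (String × String × String × String))), Dom_get_task_data task dataset → Pre_get_task_data task dataset → Spec_get_task_data task dataset (get_task_data task dataset)

-- ===== LEMMAS AND PROOFS =====

-- closed form of A's fold: two per-sentence maps
theorem A_fold (col : Int) (ds : List (List (String × String × String × String)))
    (acc : List (List String) × List (List String)) :
    ds.foldl
      (fun acc sentence =>
        (acc.1 ++ [sentence.map (fun tup => tup.1)],
         acc.2 ++ [sentence.map (fun tup => tupGet tup col)]))
      acc
    = (acc.1 ++ ds.map (fun s => s.map (fun tup => tup.1)),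
       acc.2 ++ ds.map (fun s => s.map (fun tup => tupGet tup col))) := by
  induction ds generalizing acc with
  | nil => simp
  | cons s rest ih => simp [List.foldl_cons, ih]

-- closed form of B's inner fold: the four column lists of one sentence
theorem B_inner (s : List (String × String × String × String)) (c : Cur4) :
    s.foldl
      (fun (c : Cur4) t =>
        (c.1 ++ [t.1], c.2.1 ++ [t.2.1], c.2.2.1 ++ [t.2.2.1], c.2.2.2 ++ [t.2.2.2]))
      c
    = (c.1 ++ s.map (fun t => t.1), c.2.1 ++ s.map (fun t => t.2.1),
       c.2.2.1 ++ s.map (fun t => t.2.2.1), c.2.2.2 ++ s.map (fun t => t.2.2.2)) := by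
  induction s generalizing c with
  | nil => simp
  | cons t rest ih => simp [List.foldl_cons, ih]

-- closed form of B's outer fold: the column-major transpose of the whole dataset
theorem B_outer (ds : List (List (String × String × String × String))) (cs : Cols4) :
    ds.foldl
      (fun (cs : Cols4) sentence =>
        let cur : Cur4 := sentence.foldl
          (fun (c : Cur4) t =>
            (c.1 ++ [t.1], c.2.1 ++ [t.2.1], c.2.2.1 ++ [t.2.2.1], c.2.2.2 ++ [t.2.2.2]))
          ([], [], [], [])
        (cs.1 ++ [cur.1], cs.2.1 ++ [cur.2.1], cs.2.2.1 ++ [cur.2.2.1], cs.2.2.2 ++ [cur.2.2.2]))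
      cs
    = (cs.1 ++ ds.map (fun s => s.map (fun t => t.1)),
       cs.2.1 ++ ds.map (fun s => s.map (fun t => t.2.1)),
       cs.2.2.1 ++ ds.map (fun s => s.map (fun t => t.2.2.1)),
       cs.2.2.2 ++ ds.map (fun s => s.map (fun t => t.2.2.2))) := by
  induction ds generalizing cs with
  | nil => simp
  | cons s rest ih =>
      simp only [List.foldl_cons]
      rw [ih]
      simp [B_inner]

-- ===== VERDICT (by name: the statement is the Claim_ definition above) =====
theorem col_pos : PySem.Dict.getD taskToColumn "pos" 0 = 1 := by decide
theorem col_chunk : PySem.Dict.getD taskToColumn "chunk" 0 = 2 := by decide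
theorem col_ner : PySem.Dict.getD taskToColumn "ner" 0 = 3 := by decide

theorem get_task_data_spec : Claim_equal_get_task_data := by
  intro task dataset _ hpre
  unfold Spec_get_task_data get_task_data get_task_data_alt
  rcases hpre with h | h | h <;> subst h <;>
    simp only [A_fold, B_outer, col_pos, col_chunk, col_ner] <;>
    simp [colsGet, tupGet]
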